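-- pv_equiv track=rewrite | github.com/Zwerd/ziochub | utils/sanity_checks.py | _is_popular_domain
-- ===== SOURCE A (Python) =====
-- _POPULAR_DOMAINS = {
--     'google.com', 'google.co.il', 'youtube.com', 'facebook.com',
--     'amazon.com', 'microsoft.com', 'apple.com', 'x.com', 'twitter.com',
--     'instagram.com', 'linkedin.com', 'wikipedia.org', 'netflix.com',
--     'reddit.com', 'github.com', 'cloudflare.com', 'office.com',
--     'live.com', 'bing.com', 'office365.com', 'windows.com',
--     'windowsupdate.com', 'outlook.com', 'yahoo.com', 'whatsapp.com',
--     'zoom.us', 'adobe.com', 'salesforce.com', 'dropbox.com',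
--     'slack.com', 'wordpress.com', 'stackoverflow.com', 'mozilla.org',
--     'python.org', 'docker.com', 'npmjs.com', 'pypi.org',
--     'googleapis.com', 'gstatic.com', 'googleusercontent.com',
--     'amazonaws.com', 'azure.com', 'akamai.com', 'fastly.com',
--     'cdn77.com', 'telegram.org', 'signal.org', 'tiktok.com',
--     'paypal.com', 'github.io', 'gitlab.com',
-- }
--
-- def _is_popular_domain(domain: str) -> str | None:
--     """Return the matched popular domain, or None."""
--     d = domain.lower().strip('.')
--     if d in _POPULAR_DOMAINS:
--         return d
--     for pop in _POPULAR_DOMAINS: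
--         if d.endswith('.' + pop):
--             return pop
--     return None
-- ===== SOURCE B (Python) =====
-- _POPULAR_DOMAINS = frozenset((
--     'google.com google.co.il youtube.com facebook.com '
--     'amazon.com microsoft.com apple.com x.com '
--     'twitter.com instagram.com linkedin.com wikipedia.org '
--     'netflix.com reddit.com github.com cloudflare.com '
--     'office.com live.com bing.com office365.com '
--     'windows.com windowsupdate.com outlook.com yahoo.com '
--     'whatsapp.com zoom.us adobe.com salesforce.com '
--     'dropbox.com slack.com wordpress.com stackoverflow.com '
--     'mozilla.org python.org docker.com npmjs.com '
--     'pypi.org googleapis.com gstatic.com googleusercontent.com '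
--     'amazonaws.com azure.com akamai.com fastly.com '
--     'cdn77.com telegram.org signal.org tiktok.com '
--     'paypal.com github.io gitlab.com'
-- ).split())
--
--
-- def _is_popular_domain(domain: str) -> str | None:
--     """Return the matched popular domain, or None."""
--     d = domain.lower().strip('.')
--     # peel labels off the front, looking each remaining suffix up in the set;
--     # correct because no popular domain is a dot-suffix of another
--     while True:
--         if d in _POPULAR_DOMAINS:
--             return d
--         _, sep, tail = d.partition('.')
--         if not sep:
--             return None
--         d = tail
-- ===== Notes on version B (the rewrite author's own statement) =====
-- stated objective: alternative
-- what changed: Instead of scanning all 51 popular domains and testing each as a dot-prefixed suffix of the input, B runs a while loop that peels labels off the front of the normalized domain (via str.partition('.')) and looks each remaining suffix up in the set; correct because no popular domain is a dot-suffix of another, so at most one suffix can match.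
import Mathlib
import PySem

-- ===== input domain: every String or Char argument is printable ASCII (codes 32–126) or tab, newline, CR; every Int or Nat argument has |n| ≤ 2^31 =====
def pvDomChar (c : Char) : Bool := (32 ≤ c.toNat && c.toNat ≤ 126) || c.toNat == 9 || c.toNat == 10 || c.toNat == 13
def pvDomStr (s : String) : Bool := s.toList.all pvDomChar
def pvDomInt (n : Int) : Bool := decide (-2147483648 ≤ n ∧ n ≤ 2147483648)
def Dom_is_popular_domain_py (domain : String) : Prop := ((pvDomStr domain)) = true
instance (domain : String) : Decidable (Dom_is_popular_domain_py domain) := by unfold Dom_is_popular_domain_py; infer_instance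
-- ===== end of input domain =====

set_option maxRecDepth 8000
set_option maxHeartbeats 1600000


-- B replaces A's 51-way endswith scan over the constant set by a loop that peels labels off the
-- front of the input, looking each remaining suffix up in the set (alternative traversal; same results).

-- ===== PORT A =====
-- the module constant _POPULAR_DOMAINS as A writes it: a set literal of 51 strings, in source order
def pvPop : List (List Char) :=
  ["google.com".toList, "google.co.il".toList, "youtube.com".toList, "facebook.com".toList,
   "amazon.com".toList, "microsoft.com".toList, "apple.com".toList, "x.com".toList, "twitter.com".toList,
   "instagram.com".toList, "linkedin.com".toList, "wikipedia.org".toList, "netflix.com".toList,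
   "reddit.com".toList, "github.com".toList, "cloudflare.com".toList, "office.com".toList,
   "live.com".toList, "bing.com".toList, "office365.com".toList, "windows.com".toList,
   "windowsupdate.com".toList, "outlook.com".toList, "yahoo.com".toList, "whatsapp.com".toList,
   "zoom.us".toList, "adobe.com".toList, "salesforce.com".toList, "dropbox.com".toList,
   "slack.com".toList, "wordpress.com".toList, "stackoverflow.com".toList, "mozilla.org".toList,
   "python.org".toList, "docker.com".toList, "npmjs.com".toList, "pypi.org".toList,
   "googleapis.com".toList, "gstatic.com".toList, "googleusercontent.com".toList,
   "amazonaws.com".toList, "azure.com".toList, "akamai.com".toList, "fastly.com".toList,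
   "cdn77.com".toList, "telegram.org".toList, "signal.org".toList, "tiktok.com".toList,
   "paypal.com".toList, "github.io".toList, "gitlab.com".toList]

def is_popular_domain_py (domain : String) : Option String :=
  let d := PySem.Chars.stripChars (PySem.Chars.lower domain.toList) ['.']
  if d ∈ pvPop then some (String.ofList d)
  else
    match pvPop.findSome? (fun pop =>
        if PySem.Chars.endswith d ('.' :: pop) then some pop else none) with
    | some pop => some (String.ofList pop)
    | none => none

-- ===== PORT B =====
-- B writes the constant as frozenset('google.com google.co.il …'.split())
def pvPopB : List (List Char) :=
  PySem.Chars.split₀ (("google.com google.co.il youtube.com facebook.com " ++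
    "amazon.com microsoft.com apple.com x.com " ++
    "twitter.com instagram.com linkedin.com wikipedia.org " ++
    "netflix.com reddit.com github.com cloudflare.com " ++
    "office.com live.com bing.com office365.com " ++
    "windows.com windowsupdate.com outlook.com yahoo.com " ++
    "whatsapp.com zoom.us adobe.com salesforce.com " ++
    "dropbox.com slack.com wordpress.com stackoverflow.com " ++
    "mozilla.org python.org docker.com npmjs.com " ++
    "pypi.org googleapis.com gstatic.com googleusercontent.com " ++
    "amazonaws.com azure.com akamai.com fastly.com " ++
    "cdn77.com telegram.org signal.org tiktok.com " ++
    "paypal.com github.io gitlab.com")).toList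

-- B's while-loop: check the current suffix, then peel everything up to and including the first dot.
-- d.partition('.') is ported by hand via dropWhile, exact for a single-char separator: the match is
-- [] iff sep was empty (no dot), else '.' :: tail where tail is everything after the first dot.
def pvAltGo (d : List Char) : Option (List Char) :=
  if d ∈ pvPopB then some d
  else
    match h : d.dropWhile (fun c => c ≠ '.') with
    | [] => none
    | _ :: tail => pvAltGo tail
termination_by d.length
decreasing_by
  have h1 : (d.dropWhile (fun c => c ≠ '.')).length ≤ d.length := List.length_dropWhile_le _ _
  rw [h] at h1; simp at h1 ⊢; omega

def is_popular_domain_py_alt (domain : String) : Option String :=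
  let d := PySem.Chars.stripChars (PySem.Chars.lower domain.toList) ['.']
  match pvAltGo d with
  | some p => some (String.ofList p)
  | none => none

-- ===== PRECONDITION & SPEC =====
def Spec_is_popular_domain_py (domain : String) (out : Option String) : Prop := out = is_popular_domain_py_alt domain
instance (domain : String) (out : Option String) : Decidable (Spec_is_popular_domain_py domain out) := by unfold Spec_is_popular_domain_py; infer_instance

-- ===== CLAIM (what is proved, stated in full; the proofs are below) =====
def Claim_equal_is_popular_domain_py : Prop := ∀ (domain : String), Dom_is_popular_domain_py domain → Spec_is_popular_domain_py domain (is_popular_domain_py domain)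

-- ===== LEMMAS AND PROOFS =====

-- the two renderings of the constant agree
theorem pvPopB_eq : pvPopB = pvPop := by
  unfold pvPopB
  simp only [String.toList_append]
  decide

-- no popular domain is another popular domain with '.' prepended, as a suffix (51×51 pairs, kernel-checked)
theorem pvPop_no_dot_suffix :
    pvPop.all (fun p => pvPop.all (fun q => !(('.' :: q).isSuffixOf p))) = true := by decide

theorem pv_no_dot_suffix {p q : List Char} (hp : p ∈ pvPop) (hq : q ∈ pvPop) :
    ¬ ('.' :: q) <:+ p := by
  intro hs
  have h1 := List.all_eq_true.mp pvPop_no_dot_suffix p hp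
  have h2 := List.all_eq_true.mp h1 q hq
  rw [Bool.not_eq_eq_eq_not, Bool.not_true, ← Bool.not_eq_true, List.isSuffixOf_iff_suffix] at h2
  exact h2 hs

-- any suffix of tw ++ dw headed by '.' fits inside dw, when tw is dot-free
theorem pv_dot_suffix_short {tw dw s : List Char} (htw : ∀ x ∈ tw, x ≠ '.')
    (hs : ('.' :: s) <:+ (tw ++ dw)) : s.length + 1 ≤ dw.length := by
  by_contra hlen
  obtain ⟨u, hu⟩ := hs
  have hlu : u.length + (s.length + 1) = tw.length + dw.length := by
    have := congrArg List.length hu; simpa using this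
  have hult : u.length < tw.length := by omega
  have hi : u.length < (u ++ '.' :: s).length := by simp
  have e1 : (u ++ '.' :: s)[u.length]'hi = '.' := by
    rw [List.getElem_append_right (Nat.le_refl _)]; simp
  have e2 : (u ++ '.' :: s)[u.length]'hi = (tw ++ dw)[u.length]'(hu ▸ hi) :=
    List.getElem_of_eq hu hi
  have e3 : (tw ++ dw)[u.length]'(hu ▸ hi) = tw[u.length]'hult :=
    List.getElem_append_left hult
  exact htw _ (List.getElem_mem hult) (by rw [← e3, ← e2, e1])

-- findSome? only looks at the values of f on members
theorem pv_findSome?_ext {α β : Type} (l : List α) (f g : α → Option β)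
    (h : ∀ a ∈ l, f a = g a) : l.findSome? f = l.findSome? g := by
  induction l with
  | nil => rfl
  | cons x xs ih =>
    rw [List.findSome?_cons, List.findSome?_cons, h x (by simp)]
    cases g x with
    | some b => rfl
    | none => exact ih (fun a ha => h a (by simp [ha]))

-- A's scan over the constants
def pvScanA (d : List Char) : Option (List Char) :=
  pvPop.findSome? (fun pop => if PySem.Chars.endswith d ('.' :: pop) then some pop else none)

-- characterisation of B's loop by A's scan
theorem pvAltGo_eq (n : Nat) : ∀ d : List Char, d.length ≤ n →
    pvAltGo d = (if d ∈ pvPop then some d else pvScanA d) := by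
  induction n with
  | zero =>
    intro d hd
    have hd0 : d = [] := List.eq_nil_of_length_eq_zero (by omega)
    subst hd0
    rw [pvAltGo]
    simp only [pvPopB_eq]
    by_cases hm : ([] : List Char) ∈ pvPop
    · simp [hm]
    · simp only [hm, if_neg, not_false_iff, List.dropWhile_nil]
      unfold pvScanA
      rw [List.findSome?_eq_none_iff.mpr]
      intro pop hpop
      rw [if_neg]
      intro hend
      have h1 := (PySem.Chars.endswith_iff _ _).mp hend
      have h2 := List.IsSuffix.length_le h1
      simp at h2
  | succ n ih =>
    intro d hd
    rw [pvAltGo]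
    simp only [pvPopB_eq]
    by_cases hm : d ∈ pvPop
    · simp [hm]
    · simp only [hm, if_neg, not_false_iff]
      have hsplit : d.takeWhile (fun c => c ≠ '.') ++ d.dropWhile (fun c => c ≠ '.') = d :=
        List.takeWhile_append_dropWhile
      have htw : ∀ x ∈ d.takeWhile (fun c => c ≠ '.'), x ≠ '.' := by
        intro x hx
        have := List.mem_takeWhile_imp hx
        simpa using this
      cases hdw : d.dropWhile (fun c => c ≠ '.') with
      | nil =>
        -- no dot in d: A's scan finds nothing either
        unfold pvScanA
        rw [List.findSome?_eq_none_iff.mpr]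
        intro pop hpop
        rw [if_neg]
        intro hend
        have hsuf := (PySem.Chars.endswith_iff _ _).mp hend
        have hsuf' : ('.' :: pop) <:+ (d.takeWhile (fun c => c ≠ '.') ++ []) := by
          rw [← hdw, hsplit]; exact hsuf
        have := pv_dot_suffix_short htw hsuf'
        simp at this
      | cons c tail =>
        -- c is the first dot; tail is everything after it
        have hc : c = '.' := by
          have hne : d.dropWhile (fun c => c ≠ '.') ≠ [] := by rw [hdw]; simp
          have hh := List.head_dropWhile_not (fun c => decide (c ≠ '.')) hne
          have hhead : ∀ (l : List Char) (h : l ≠ []), l = c :: tail → l.head h = c := by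
            intro l h he; subst he; rfl
          rw [hhead _ hne hdw] at hh
          simpa using hh
        subst hc
        have hsuf : ('.' :: tail) <:+ d := by
          rw [← hsplit, hdw]; exact List.suffix_append _ _
        have htail_len : tail.length ≤ n := by
          have h1 : (d.dropWhile (fun c => c ≠ '.')).length ≤ d.length := List.length_dropWhile_le _ _
          rw [hdw] at h1; simp at h1; omega
        show pvAltGo tail = pvScanA d
        rw [ih tail htail_len]
        -- now show A's scan on d equals B's continuation on tail
        by_cases htm : tail ∈ pvPop
        · -- the suffix after the first dot is itself popular: A's scan must return it
          simp only [htm, if_pos]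
          unfold pvScanA
          cases hA : pvPop.findSome? (fun pop =>
              if PySem.Chars.endswith d ('.' :: pop) then some pop else none) with
          | none =>
            exfalso
            have := List.findSome?_eq_none_iff.mp hA tail htm
            rw [if_pos ((PySem.Chars.endswith_iff _ _).mpr hsuf)] at this
            exact Option.some_ne_none _ this
          | some p =>
            obtain ⟨a, ha, hfa⟩ := List.exists_of_findSome?_eq_some hA
            by_cases hend : PySem.Chars.endswith d ('.' :: a) = true
            case neg => simp [hend] at hfa
            rw [if_pos hend] at hfa
            obtain rfl : a = p := by injection hfa
            have hps : ('.' :: a) <:+ d := (PySem.Chars.endswith_iff _ _).mp hend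
            have hps' : ('.' :: a) <:+ (d.takeWhile (fun c => c ≠ '.') ++ ('.' :: tail)) := by
              rw [← hdw, hsplit]; exact hps
            have hshort : a.length + 1 ≤ tail.length + 1 := by
              have := pv_dot_suffix_short htw hps'
              simpa using this
            rcases List.suffix_or_suffix_of_suffix hps hsuf with h | h
            · rcases List.suffix_cons_iff.mp h with he | h'
              · obtain rfl : a = tail := (List.cons_eq_cons.mp he).2
                rfl
              · exact absurd h' (pv_no_dot_suffix htm ha)
            · rcases List.suffix_cons_iff.mp h with he | h'
              · obtain rfl : a = tail := ((List.cons_eq_cons.mp he).2).symm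
                rfl
              · exfalso
                have := List.IsSuffix.length_le h'
                simp at this
                omega
        · -- otherwise A's scan sees exactly the same matches on d and on tail
          simp only [htm, if_neg, not_false_iff]
          unfold pvScanA
          apply pv_findSome?_ext
          intro pop hpop
          have hne : pop ≠ tail := fun he => htm (he ▸ hpop)
          have hiff : PySem.Chars.endswith tail ('.' :: pop) = true ↔
              PySem.Chars.endswith d ('.' :: pop) = true := by
            rw [PySem.Chars.endswith_iff, PySem.Chars.endswith_iff]
            constructor
            · intro hpt
              exact hpt.trans ((List.suffix_cons '.' tail).trans hsuf)
            · intro hpd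
              have hpd' : ('.' :: pop) <:+ (d.takeWhile (fun c => c ≠ '.') ++ ('.' :: tail)) := by
                rw [← hdw, hsplit]; exact hpd
              have hshort : pop.length + 1 ≤ tail.length + 1 := by
                have := pv_dot_suffix_short htw hpd'
                simpa using this
              rcases List.suffix_or_suffix_of_suffix hpd hsuf with h | h
              · rcases List.suffix_cons_iff.mp h with he | h'
                · exact absurd (List.cons_eq_cons.mp he).2 hne
                · exact h'
              · rcases List.suffix_cons_iff.mp h with he | h'
                · exact absurd ((List.cons_eq_cons.mp he).2).symm hne
                · exfalso
                  have := List.IsSuffix.length_le h'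
                  simp at this
                  omega
          have heq : PySem.Chars.endswith tail ('.' :: pop) =
              PySem.Chars.endswith d ('.' :: pop) := by
            rw [Bool.eq_iff_iff]; exact hiff
          rw [heq]

-- simp-friendly form of the characterisation
theorem pvAltGo_eq' (d : List Char) :
    pvAltGo d = (if d ∈ pvPop then some d else pvScanA d) :=
  pvAltGo_eq d.length d le_rfl

-- ===== VERDICT (by name: the statement is the Claim_ definition above) =====
theorem is_popular_domain_py_spec : Claim_equal_is_popular_domain_py := by
  intro domain _
  unfold Spec_is_popular_domain_py is_popular_domain_py is_popular_domain_py_alt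
  simp only [pvAltGo_eq']
  by_cases hmem : PySem.Chars.stripChars (PySem.Chars.lower domain.toList) ['.'] ∈ pvPop
  · simp [hmem]
  · simp only [hmem, if_neg, not_false_iff]
    unfold pvScanA
    rfl
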